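-- pv_equiv track=rewrite | github.com/sanjana0808/freecodecamp-python-basics | revision/reverse_order.py | reverse_user_name_2
-- ===== SOURCE A (Python) =====
-- def reverse_user_name_2(x):
--     n = len(x)
--     i = n - 1
--     empty_string = ""
--     while i >= 0:
--         empty_string = empty_string + x[i] + "\n"
--         i = i - 1
--     return empty_string
-- ===== SOURCE B (Python) =====
-- def reverse_user_name_2(x):
--     return "\n".join(x[::-1]) + ("\n" if x else "")
-- ===== Notes on version B (the rewrite author's own statement) =====
-- stated objective: simpler
-- what changed: Replaces the descending-index while loop with per-character string concatenation by a single slice-reverse plus a separator join and one conditional trailing newline.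
import Mathlib
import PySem

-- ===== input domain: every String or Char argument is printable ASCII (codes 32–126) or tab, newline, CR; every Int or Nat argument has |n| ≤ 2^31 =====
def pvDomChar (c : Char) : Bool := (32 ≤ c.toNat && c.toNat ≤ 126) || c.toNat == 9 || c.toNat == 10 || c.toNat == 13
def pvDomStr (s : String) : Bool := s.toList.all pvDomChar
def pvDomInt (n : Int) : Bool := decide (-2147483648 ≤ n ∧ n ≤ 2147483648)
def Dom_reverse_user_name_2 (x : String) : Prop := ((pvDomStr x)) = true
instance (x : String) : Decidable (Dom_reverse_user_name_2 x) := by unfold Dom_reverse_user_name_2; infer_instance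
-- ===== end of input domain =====

-- B replaces the descending-index while loop and per-character accumulator by a
-- slice-reverse plus a "\n"-separator join and one conditional trailing newline (simpler).

-- ===== PORT A =====
-- the 'while i >= 0' loop: acc = acc + x[i] + "\n"; i = i - 1
def pvALoop (cs : List Char) (i : Int) (acc : List Char) : List Char :=
  if _h : 0 ≤ i then
    match PySem.List.pyGet? cs i with
    | some c => pvALoop cs (i - 1) (acc ++ [c, '\n'])
    | none => acc    -- unreachable for 0 ≤ i < len (IndexError otherwise)
  else acc
termination_by (i + 1).toNat
decreasing_by omega

def reverse_user_name_2 (x : String) : String :=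
  String.ofList (pvALoop x.toList ((x.toList.length : Int) - 1) [])

-- ===== PORT B =====
-- "\n".join(x[::-1]) + ("\n" if x else "")
def reverse_user_name_2_alt (x : String) : String :=
  String.ofList (PySem.Chars.join ['\n']
      (((PySem.List.slice? x.toList none none (-1)).getD []).map (fun c => [c])) ++
    (if x.toList ≠ [] then ['\n'] else []))

-- ===== PRECONDITION & SPEC =====
def Spec_reverse_user_name_2 (x : String) (out : String) : Prop := out = reverse_user_name_2_alt x
instance (x : String) (out : String) : Decidable (Spec_reverse_user_name_2 x out) := by unfold Spec_reverse_user_name_2; infer_instance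

-- ===== CLAIM (what is proved, stated in full; the proofs are below) =====
def Claim_equal_reverse_user_name_2 : Prop := ∀ (x : String), Dom_reverse_user_name_2 x → Spec_reverse_user_name_2 x (reverse_user_name_2 x)

-- ===== LEMMAS AND PROOFS =====

theorem pvALoop_spec (cs : List Char) (k : Nat) (hk : k ≤ cs.length) (acc : List Char) :
    pvALoop cs ((k : Int) - 1) acc
      = acc ++ (cs.take k).reverse.flatMap (fun c => [c, '\n']) := by
  induction k generalizing acc with
  | zero => simp [pvALoop]
  | succ k ih =>
    have hk' : k < cs.length := by omega
    rw [pvALoop]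
    have hget : PySem.List.pyGet? cs ((k + 1 : Nat) - 1 : Int) = some cs[k] := by
      have : ((k + 1 : Nat) - 1 : Int) = (k : Int) := by push_cast; ring
      rw [this, PySem.List.pyGet?_natCast]
      simp [hk']
    simp only [hget]
    rw [dif_pos (by push_cast; omega)]
    have : ((k + 1 : Nat) : Int) - 1 - 1 = (k : Int) - 1 := by push_cast; ring
    rw [this, ih (by omega)]
    have ht : List.take (k + 1) cs = List.take k cs ++ [cs[k]] := by
      rw [List.take_add_one, List.getElem?_eq_getElem hk']; rfl
    rw [ht]
    simp only [List.reverse_append, List.reverse_cons, List.reverse_nil, List.nil_append,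
      List.flatMap_cons, List.cons_append,
      List.append_assoc, List.nil_append]

theorem join_newline_char (l : List Char) :
    PySem.Chars.join ['\n'] (l.map (fun c => [c])) ++ (if l ≠ [] then ['\n'] else [])
      = l.flatMap (fun c => [c, '\n']) := by
  induction l with
  | nil => simp [PySem.Chars.join_nil]
  | cons c l ih =>
    cases l with
    | nil => simp [PySem.Chars.join_singleton]
    | cons d l' =>
      simp only [List.map_cons, PySem.Chars.join_cons_cons, List.flatMap_cons, ne_eq,
        reduceCtorEq, not_false_iff, if_true] at ih ⊢
      simp only [List.append_assoc]
      rw [ih]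
      simp

-- ===== VERDICT (by name: the statement is the Claim_ definition above) =====
theorem reverse_user_name_2_spec : Claim_equal_reverse_user_name_2 := by
  intro x hx
  clear hx
  unfold Spec_reverse_user_name_2 reverse_user_name_2 reverse_user_name_2_alt
  rw [PySem.List.slice?_none_none_neg_one]
  have h := pvALoop_spec x.toList x.toList.length le_rfl []
  simp only [List.take_length] at h
  rw [h, Option.getD_some]
  have hne : (if x.toList ≠ [] then ['\n'] else ([] : List Char))
      = (if x.toList.reverse ≠ [] then ['\n'] else []) := by simp
  rw [hne, join_newline_char]
  simp
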